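-- pv_equiv track=rewrite | github.com/NoTIPswe/RepoDocumentale | notipdo/lib/requirements_data.py | _parse_named_args
-- ===== SOURCE A (Python) =====
-- def _strip_line_comments(text: str) -> str:
--     out: list[str] = []
--     in_string = False
--     escaped = False
--     i = 0
--
--     while i < len(text):
--         ch = text[i]
--
--         if in_string:
--             out.append(ch)
--             if escaped:
--                 escaped = False
--             elif ch == "\\":
--                 escaped = True
--             elif ch == '"':
--                 in_string = False
--             i += 1
--             continue
--
--         if ch == '"':
--             in_string = True
--             out.append(ch)
--             i += 1
--             continue
--
--         if ch == "/" and i + 1 < len(text) and text[i + 1] == "/":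
--             while i < len(text) and text[i] != "\n":
--                 i += 1
--             continue
--
--         out.append(ch)
--         i += 1
--
--     return "".join(out)
--
-- def _split_top_level(value: str, delimiter: str = ",") -> list[str]:
--     parts: list[str] = []
--     depth_paren = 0
--     depth_brack = 0
--     in_string = False
--     escaped = False
--     current: list[str] = []
--
--     for ch in value:
--         if in_string:
--             current.append(ch)
--             if escaped:
--                 escaped = False
--             elif ch == "\\":
--                 escaped = True
--             elif ch == '"':
--                 in_string = False
--             continue
--
--         if ch == '"':
--             in_string = True
--             current.append(ch)
--             continue
--
--         if ch == "(":
--             depth_paren += 1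
--         elif ch == ")":
--             depth_paren -= 1
--         elif ch == "[":
--             depth_brack += 1
--         elif ch == "]":
--             depth_brack -= 1
--
--         if ch == delimiter and depth_paren == 0 and depth_brack == 0:
--             part = "".join(current).strip()
--             if part:
--                 parts.append(part)
--             current = []
--         else:
--             current.append(ch)
--
--     tail = "".join(current).strip()
--     if tail:
--         parts.append(tail)
--     return parts
--
-- def _parse_named_args(raw: str) -> dict[str, str]:
--     result: dict[str, str] = {}
--     for part in _split_top_level(_strip_line_comments(raw)):
--         if ":" not in part:
--             continue
--         key, value = part.split(":", 1)
--         result[key.strip()] = value.strip()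
--     return result
-- ===== SOURCE B (Python) =====
-- def _parse_named_args(raw: str) -> dict[str, str]:
--     # Single fused pass: strips // comments, splits on top-level commas and
--     # builds the dict as parts complete, instead of three separate passes.
--     result: dict[str, str] = {}
--     in_string = False
--     escaped = False
--     depth_paren = 0
--     depth_brack = 0
--     current: list[str] = []
--
--     def finish(buf: list[str]) -> None:
--         part = "".join(buf).strip()
--         if part and ":" in part:
--             key, value = part.split(":", 1)
--             result[key.strip()] = value.strip()
--
--     i = 0
--     n = len(raw)
--     while i < n:
--         ch = raw[i]
--         if in_string:
--             current.append(ch)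
--             if escaped:
--                 escaped = False
--             elif ch == "\\":
--                 escaped = True
--             elif ch == '"':
--                 in_string = False
--             i += 1
--             continue
--         if ch == '"':
--             in_string = True
--             current.append(ch)
--             i += 1
--             continue
--         if ch == "/" and i + 1 < n and raw[i + 1] == "/":
--             while i < n and raw[i] != "\n":
--                 i += 1
--             continue
--         if ch == "(":
--             depth_paren += 1
--         elif ch == ")":
--             depth_paren -= 1
--         elif ch == "[":
--             depth_brack += 1
--         elif ch == "]":
--             depth_brack -= 1
--         if ch == "," and depth_paren == 0 and depth_brack == 0:
--             finish(current)
--             current = []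
--         else:
--             current.append(ch)
--         i += 1
--     finish(current)
--     return result
-- ===== Notes on version B (the rewrite author's own statement) =====
-- stated objective: alternative
-- what changed: A makes three passes (build a comment-stripped copy, re-scan it to split on top-level commas into a parts list, then loop over the parts to build the dict); B is one fused scan that tracks string/escape/depth state, skips // comments in place, and finishes each part into the dict the moment a top-level comma is seen, with no intermediate stripped string or parts list.
import Mathlib
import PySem

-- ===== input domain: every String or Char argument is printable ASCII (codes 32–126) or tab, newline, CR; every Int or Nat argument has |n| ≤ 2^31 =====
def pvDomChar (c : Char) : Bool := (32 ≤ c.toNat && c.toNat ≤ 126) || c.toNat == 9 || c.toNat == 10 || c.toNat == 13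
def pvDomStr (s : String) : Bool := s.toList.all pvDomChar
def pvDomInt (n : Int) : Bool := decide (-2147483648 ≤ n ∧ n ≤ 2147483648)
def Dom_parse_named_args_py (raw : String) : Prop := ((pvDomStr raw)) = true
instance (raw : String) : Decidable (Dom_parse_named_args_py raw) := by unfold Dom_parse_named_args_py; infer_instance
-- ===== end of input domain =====

-- B fuses A's three passes (strip // comments, split on top-level commas, build the dict) into one scan; same O(n) cost, different decomposition.


-- ===== PORT A =====
-- _strip_line_comments: the comment branch's inner while ('skip until newline, without consuming it') is List.dropWhile
def pvStripGo : List Char → Bool → Bool → List Char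
  | [], _, _ => []
  | c :: cs, inS, esc =>
    if inS then
      if esc then c :: pvStripGo cs inS false
      else if c = '\\' then c :: pvStripGo cs inS true
      else if c = '"' then c :: pvStripGo cs false esc
      else c :: pvStripGo cs inS esc
    else if c = '"' then c :: pvStripGo cs true esc
    else if c = '/' ∧ cs.head? = some '/' then
      pvStripGo (cs.dropWhile (fun x => x ≠ '\n')) inS esc
    else c :: pvStripGo cs inS esc
termination_by cs _ _ => cs.length
decreasing_by
  all_goals simp
  all_goals exact List.length_dropWhile_le _ cs

-- _split_top_level's for loop (delimiter a parameter as in A, always called with ',')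
def pvSplitGo (delim : Char) : List Char → Bool → Bool → Int → Int → List Char → List (List Char) → List (List Char)
  | [], _, _, _, _, cur, parts =>
    let tail := PySem.Chars.strip cur
    if tail ≠ [] then parts ++ [tail] else parts
  | c :: cs, inS, esc, dp, db, cur, parts =>
    if inS then
      if esc then pvSplitGo delim cs inS false dp db (cur ++ [c]) parts
      else if c = '\\' then pvSplitGo delim cs inS true dp db (cur ++ [c]) parts
      else if c = '"' then pvSplitGo delim cs false esc dp db (cur ++ [c]) parts
      else pvSplitGo delim cs inS esc dp db (cur ++ [c]) parts
    else if c = '"' then pvSplitGo delim cs true esc dp db (cur ++ [c]) parts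
    else
      -- Python mutates the depths, then tests; the updated depths are written inline here
      if c = delim ∧ (if c = '(' then dp + 1 else if c = ')' then dp - 1 else dp) = 0
           ∧ (if c = '[' then db + 1 else if c = ']' then db - 1 else db) = 0 then
        pvSplitGo delim cs inS esc (if c = '(' then dp + 1 else if c = ')' then dp - 1 else dp)
          (if c = '[' then db + 1 else if c = ']' then db - 1 else db) []
          (if PySem.Chars.strip cur ≠ [] then parts ++ [PySem.Chars.strip cur] else parts)
      else pvSplitGo delim cs inS esc (if c = '(' then dp + 1 else if c = ')' then dp - 1 else dp)
          (if c = '[' then db + 1 else if c = ']' then db - 1 else db) (cur ++ [c]) parts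

-- body of _parse_named_args' for loop: skip parts without ':', else part.split(':', 1) and insert stripped key/value
def pvStepA (d : PySem.Dict String String) (part : List Char) : PySem.Dict String String :=
  if PySem.Chars.isIn [':'] part then
    match PySem.Chars.splitOnMax part [':'] 1 with
    | [k, v] => d.insert (String.ofList (PySem.Chars.strip k)) (String.ofList (PySem.Chars.strip v))
    | _ => d  -- unreachable: with ':' in part, split(':', 1) yields exactly two pieces
  else d

def parse_named_args_py (raw : String) : List (String × String) :=
  ((pvSplitGo ',' (pvStripGo raw.toList false false) false false 0 0 [] []).foldl
    pvStepA PySem.Dict.empty).items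

-- ===== PORT B =====
-- B's finish(buf): strip the buffered part and, if nonempty and containing ':', insert into the dict
def pvFinishB (d : PySem.Dict String String) (buf : List Char) : PySem.Dict String String :=
  let part := PySem.Chars.strip buf
  if part ≠ [] ∧ PySem.Chars.isIn [':'] part then
    match PySem.Chars.splitOnMax part [':'] 1 with
    | [k, v] => d.insert (String.ofList (PySem.Chars.strip k)) (String.ofList (PySem.Chars.strip v))
    | _ => d
  else d

-- B's single fused scan; the comment branch's inner while is List.dropWhile as in the Python
def pvFusedGo : List Char → Bool → Bool → Int → Int → List Char → PySem.Dict String String → PySem.Dict String String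
  | [], _, _, _, _, cur, d => pvFinishB d cur
  | c :: cs, inS, esc, dp, db, cur, d =>
    if inS then
      if esc then pvFusedGo cs inS false dp db (cur ++ [c]) d
      else if c = '\\' then pvFusedGo cs inS true dp db (cur ++ [c]) d
      else if c = '"' then pvFusedGo cs false esc dp db (cur ++ [c]) d
      else pvFusedGo cs inS esc dp db (cur ++ [c]) d
    else if c = '"' then pvFusedGo cs true esc dp db (cur ++ [c]) d
    else if c = '/' ∧ cs.head? = some '/' then
      pvFusedGo (cs.dropWhile (fun x => x ≠ '\n')) inS esc dp db cur d
    else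
      -- Python mutates the depths, then tests; the updated depths are written inline here
      if c = ',' ∧ (if c = '(' then dp + 1 else if c = ')' then dp - 1 else dp) = 0
           ∧ (if c = '[' then db + 1 else if c = ']' then db - 1 else db) = 0 then
        pvFusedGo cs inS esc (if c = '(' then dp + 1 else if c = ')' then dp - 1 else dp)
          (if c = '[' then db + 1 else if c = ']' then db - 1 else db) [] (pvFinishB d cur)
      else pvFusedGo cs inS esc (if c = '(' then dp + 1 else if c = ')' then dp - 1 else dp)
          (if c = '[' then db + 1 else if c = ']' then db - 1 else db) (cur ++ [c]) d
termination_by cs _ _ _ _ _ _ => cs.length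
decreasing_by
  all_goals simp
  all_goals exact List.length_dropWhile_le _ cs

def parse_named_args_py_alt (raw : String) : List (String × String) :=
  (pvFusedGo raw.toList false false 0 0 [] PySem.Dict.empty).items

-- ===== PRECONDITION & SPEC =====
def Spec_parse_named_args_py (raw : String) (out : List (String × String)) : Prop := out = parse_named_args_py_alt raw
instance (raw : String) (out : List (String × String)) : Decidable (Spec_parse_named_args_py raw out) := by unfold Spec_parse_named_args_py; infer_instance

-- ===== CLAIM (what is proved, stated in full; the proofs are below) =====
def Claim_equal_parse_named_args_py : Prop := ∀ (raw : String), Dom_parse_named_args_py raw → Spec_parse_named_args_py raw (parse_named_args_py raw)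

-- ===== LEMMAS AND PROOFS =====

-- the parts accumulator of pvSplitGo is a pure prefix
lemma pvSplitGo_acc (delim : Char) : ∀ (cs : List Char) (inS esc : Bool) (dp db : Int) (cur : List Char) (parts : List (List Char)),
    pvSplitGo delim cs inS esc dp db cur parts = parts ++ pvSplitGo delim cs inS esc dp db cur [] := by
  intro cs
  induction cs with
  | nil =>
    intro inS esc dp db cur parts
    simp only [pvSplitGo]
    split_ifs <;> simp
  | cons c cs ih =>
    intro inS esc dp db cur parts
    simp only [pvSplitGo]
    split_ifs with h1 h2 h3 h4 h5 h6 h7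
    all_goals try exact ih _ _ _ _ _ _
    all_goals (rw [ih]; conv_rhs => rw [ih])
    all_goals simp

-- finishing one buffered part agrees with A's 'append the nonempty stripped part, then run the dict step'
lemma pvFinishB_eq (d : PySem.Dict String String) (cur : List Char) :
    pvFinishB d cur = (if PySem.Chars.strip cur ≠ [] then [PySem.Chars.strip cur] else []).foldl pvStepA d := by
  by_cases h : PySem.Chars.strip cur = [] <;> simp [pvFinishB, pvStepA, h]

-- the fused scan equals A's pipeline from any aligned intermediate state
lemma pvFusedGo_eq : ∀ (cs : List Char) (inS esc : Bool) (dp db : Int) (cur : List Char) (d : PySem.Dict String String),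
    pvFusedGo cs inS esc dp db cur d =
      (pvSplitGo ',' (pvStripGo cs inS esc) inS esc dp db cur []).foldl pvStepA d := by
  intro cs inS esc dp db cur d
  induction cs, inS, esc, dp, db, cur, d using pvFusedGo.induct with
  | case1 inS esc dp db cur d =>
    simp only [pvFusedGo, pvStripGo, pvSplitGo, pvFinishB_eq]
    split_ifs <;> simp
  | case2 c cs dp db cur d ih =>
    simp [pvFusedGo, pvStripGo, pvSplitGo, ih]
  | case3 cs esc dp db cur d h1 ih =>
    simp_all [pvFusedGo, pvStripGo, pvSplitGo]
  | case4 cs esc dp db cur d h1 h2 ih =>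
    simp_all [pvFusedGo, pvStripGo, pvSplitGo]
  | case5 c cs esc dp db cur d h1 h2 h3 ih =>
    simp_all [pvFusedGo, pvStripGo, pvSplitGo]
  | case6 cs inS esc dp db cur d h1 ih =>
    simp_all [pvFusedGo, pvStripGo, pvSplitGo]
  | case7 c cs inS esc dp db cur d h1 h2 h3 ih =>
    simp_all [pvFusedGo, pvStripGo]
  | case8 c cs inS esc dp db cur d h1 h2 h3 h4 ih =>
    -- top-level comma: pull the finished part out of the split accumulator
    obtain ⟨hc, hdp, hdb⟩ := h4
    subst hc
    simp only [dite_eq_ite] at hdp hdb ih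
    simp at hdp hdb
    subst hdp; subst hdb
    simp [pvFusedGo, pvStripGo, pvSplitGo, if_neg h1]
    conv_rhs => rw [pvSplitGo_acc]
    have hfe := pvFinishB_eq d cur
    simp at hfe
    rw [List.foldl_append, ← hfe]
    exact ih
  | case9 c cs inS esc dp db cur d h1 h2 h3 h4 ih =>
    simp only [dite_eq_ite] at h4 ih
    simp only [pvFusedGo, pvStripGo, pvSplitGo, if_neg h1, if_neg h2, if_neg h3, if_neg h4, ih]

-- ===== VERDICT (by name: the statement is the Claim_ definition above) =====
theorem parse_named_args_py_spec : Claim_equal_parse_named_args_py := by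
  intro raw _
  unfold Spec_parse_named_args_py parse_named_args_py parse_named_args_py_alt
  rw [pvFusedGo_eq]
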